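-- pv_equiv track=rewrite | github.com/aruaru0/python_myatcoder | other/algo_math/077.py | calc
-- ===== SOURCE A (Python) =====
-- def calc(a) :
--     n = len(a)
--     b = [0 for _ in range (n+1)]
--     for i in range(n):
--         b[i+1] = b[i] + a[i]
--
--     ret = 0
--     for i in range(n):
--         diff = b[n] - b[i+1] - a[i]*(n-1-i)
--         ret += diff
--
--     return ret
-- ===== SOURCE B (Python) =====
-- def calc(a):
--     n = len(a)
--     ret = 0
--     for k, x in enumerate(a):
--         ret += x * (2 * k - (n - 1))
--     return ret
-- ===== Notes on version B (the rewrite author's own statement) =====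
-- stated objective: simpler
-- what changed: Drops the prefix-sum array entirely: each element a[k] contributes with the closed-form coefficient 2*k-(n-1), accumulated in a single enumerate loop with no auxiliary list.
import Mathlib
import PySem

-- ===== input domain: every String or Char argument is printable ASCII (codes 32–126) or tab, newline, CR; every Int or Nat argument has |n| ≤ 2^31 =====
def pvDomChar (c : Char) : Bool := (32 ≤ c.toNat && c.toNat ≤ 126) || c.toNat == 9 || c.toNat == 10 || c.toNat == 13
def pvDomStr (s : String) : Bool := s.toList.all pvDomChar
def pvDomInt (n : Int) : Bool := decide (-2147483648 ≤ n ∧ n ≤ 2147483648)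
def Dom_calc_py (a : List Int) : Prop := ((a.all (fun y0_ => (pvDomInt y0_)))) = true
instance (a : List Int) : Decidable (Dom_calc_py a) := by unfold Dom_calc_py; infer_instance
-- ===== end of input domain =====

-- B replaces A's prefix-sum array by a single loop with the closed-form coefficient 2*k-(n-1) per element (objective: simpler).

-- ===== PORT A =====
def calc_py (a : List Int) : Int :=
  let n := a.length
  let b0 : List Int := (List.range (n + 1)).map (fun _ => 0)
  let b := (List.range n).foldl (fun b i => b.set (i + 1) (b.getD i 0 + a.getD i 0)) b0
  (List.range n).foldl
    (fun ret i => ret + (b.getD n 0 - b.getD (i + 1) 0 - a.getD i 0 * ((n : Int) - 1 - (i : Int)))) 0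

-- ===== PORT B =====
def calc_py_alt (a : List Int) : Int :=
  let n := a.length
  (PySem.List.enumerate a).foldl (fun ret p => ret + p.2 * (2 * p.1 - ((n : Int) - 1))) 0

-- ===== PRECONDITION & SPEC =====
def Spec_calc_py (a : List Int) (out : Int) : Prop := out = calc_py_alt a
instance (a : List Int) (out : Int) : Decidable (Spec_calc_py a out) := by unfold Spec_calc_py; infer_instance

-- ===== CLAIM (what is proved, stated in full; the proofs are below) =====
def Claim_equal_calc_py : Prop := ∀ (a : List Int), Dom_calc_py a → Spec_calc_py a (calc_py a)

-- ===== LEMMAS AND PROOFS =====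

-- prefix sum of the first i elements (getD-based)
def pvP (a : List Int) (i : Nat) : Int := ∑ j ∈ Finset.range i, a.getD j 0

-- A's first loop builds the prefix-sum table: length invariant and pointwise value.
theorem pv_build (a : List Int) (m : Nat) (hm : m ≤ a.length) :
    ((List.range m).foldl (fun b i => b.set (i + 1) (b.getD i 0 + a.getD i 0))
        ((List.range (a.length + 1)).map (fun _ => (0 : Int)))).length = a.length + 1 ∧
    ∀ j, ((List.range m).foldl (fun b i => b.set (i + 1) (b.getD i 0 + a.getD i 0))
        ((List.range (a.length + 1)).map (fun _ => (0 : Int)))).getD j 0 =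
      if j ≤ m ∧ 1 ≤ j then pvP a j else 0 := by
  induction m with
  | zero =>
    constructor
    · simp
    · intro j
      simp only [List.range_zero, List.foldl_nil]
      have : ¬ (j ≤ 0 ∧ 1 ≤ j) := by omega
      rw [if_neg this]
      by_cases h : j < a.length + 1
      · rw [List.getD_eq_getElem _ _ (by simpa using h)]
        simp
      · rw [List.getD_eq_default _ _ (by simpa using h)]
  | succ m ih =>
    have hm' : m ≤ a.length := by omega
    obtain ⟨hlen, hval⟩ := ih hm'
    have hstep : ∀ (f : List Int → Nat → List Int) (init : List Int) (k : Nat),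
        (List.range (k + 1)).foldl f init = f ((List.range k).foldl f init) k := by
      intro f init k
      rw [List.range_succ, List.foldl_append, List.foldl_cons, List.foldl_nil]
    rw [hstep]
    set B := (List.range m).foldl (fun b i => b.set (i + 1) (b.getD i 0 + a.getD i 0))
      ((List.range (a.length + 1)).map (fun _ => (0 : Int))) with hB
    constructor
    · simp [hlen]
    · intro j
      by_cases hj : j = m + 1
      · subst hj
        rw [List.getD_eq_getElem _ _ (by rw [List.length_set, hlen]; omega)]
        rw [List.getElem_set_self]
        rw [hval m]
        rw [if_pos (show m + 1 ≤ m + 1 ∧ 1 ≤ m + 1 by omega)]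
        split_ifs with h
        · simp [pvP, Finset.sum_range_succ]
        · have hm0 : m = 0 := by omega
          simp [hm0, pvP]
      · by_cases hjb : j < a.length + 1
        · rw [List.getD_eq_getElem _ _ (by rw [List.length_set, hlen]; omega)]
          rw [List.getElem_set_ne (by omega)]
          rw [← List.getD_eq_getElem _ _ (by rw [hlen]; omega)]
          rw [hval j]
          have : (j ≤ m ∧ 1 ≤ j) ↔ (j ≤ m + 1 ∧ 1 ≤ j) := by omega
          simp only [this]
        · rw [List.getD_eq_default _ _ (by rw [List.length_set, hlen]; omega)]
          have : ¬ (j ≤ m + 1 ∧ 1 ≤ j) := by omega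
          rw [if_neg this]

-- the combinatorial identity: A's per-index term sums to B's per-index term sum
theorem pv_key (a : List Int) (n : Nat) :
    ∑ i ∈ Finset.range n, (pvP a n - pvP a (i + 1) - a.getD i 0 * ((n : Int) - 1 - (i : Int))) =
    ∑ i ∈ Finset.range n, a.getD i 0 * (2 * (i : Int) - ((n : Int) - 1)) := by
  induction n with
  | zero => simp
  | succ n ih =>
    rw [Finset.sum_range_succ, Finset.sum_range_succ]
    push_cast
    have hP : pvP a (n + 1) = pvP a n + a.getD n 0 := by simp [pvP, Finset.sum_range_succ]
    have hL : ∀ i ∈ Finset.range n,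
        pvP a (n + 1) - pvP a (i + 1) - a.getD i 0 * (((n : Nat) + 1 : Int) - 1 - (i : Int)) =
        (pvP a n - pvP a (i + 1) - a.getD i 0 * ((n : Int) - 1 - (i : Int))) + (a.getD n 0 - a.getD i 0) := by
      intro i _
      rw [hP]; ring
    rw [Finset.sum_congr rfl hL, Finset.sum_add_distrib, ih]
    have hR : ∀ i ∈ Finset.range n,
        a.getD i 0 * (2 * (i : Int) - (((n : Nat) + 1 : Int) - 1)) =
        a.getD i 0 * (2 * (i : Int) - ((n : Int) - 1)) - a.getD i 0 := by
      intro i _; ring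
    rw [Finset.sum_congr rfl hR, Finset.sum_sub_distrib, Finset.sum_sub_distrib,
        Finset.sum_const, Finset.card_range]
    have hPn : ∑ i ∈ Finset.range n, a.getD i 0 = pvP a n := rfl
    rw [hPn, hP]
    ring

-- B's fold over enumerate as a sum over indices
theorem pv_alt_sum (a : List Int) :
    calc_py_alt a = ∑ i ∈ Finset.range a.length, a.getD i 0 * (2 * (i : Int) - ((a.length : Int) - 1)) := by
  unfold calc_py_alt
  have h : ∀ (l : List Int) (s : Int) (c : Int) (m : Int),
      (PySem.List.enumerate l s).foldl (fun ret p => ret + p.2 * (2 * p.1 - m)) c =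
      c + ∑ i ∈ Finset.range l.length, l.getD i 0 * (2 * ((s : Int) + (i : Int)) - m) := by
    intro l
    induction l with
    | nil => intro s c m; simp [PySem.List.enumerate_nil]
    | cons x t ih =>
      intro s c m
      rw [PySem.List.enumerate_cons, List.foldl_cons, ih]
      simp only [List.length_cons]
      rw [Finset.sum_range_succ']
      simp only [List.getD_cons_zero, List.getD_cons_succ, Nat.cast_add, Nat.cast_one,
        Nat.cast_zero]
      have : ∀ i ∈ Finset.range t.length,
          t.getD i 0 * (2 * ((s : Int) + ((i : Int) + 1)) - m) =
          t.getD i 0 * (2 * ((s + 1 : Int) + (i : Int)) - m) := by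
        intro i _; ring
      rw [Finset.sum_congr rfl this]
      ring
  rw [h a 0 0]
  simp

theorem pv_a_sum (a : List Int) :
    calc_py a = ∑ i ∈ Finset.range a.length, (pvP a a.length - pvP a (i + 1) - a.getD i 0 * ((a.length : Int) - 1 - (i : Int))) := by
  unfold calc_py
  simp only []
  obtain ⟨hlen, hval⟩ := pv_build a a.length (le_refl _)
  set B := (List.range a.length).foldl (fun b i => b.set (i + 1) (b.getD i 0 + a.getD i 0))
    ((List.range (a.length + 1)).map (fun _ => (0 : Int))) with hB
  have hcongr := PySem.List.foldl_congr_mem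
    (l := List.range a.length)
    (f := fun ret i => ret + (B.getD a.length 0 - B.getD (i + 1) 0 - a.getD i 0 * ((a.length : Int) - 1 - (i : Int))))
    (g := fun ret i => ret + (pvP a a.length - pvP a (i + 1) - a.getD i 0 * ((a.length : Int) - 1 - (i : Int))))
    (init := 0)
    (by
      intro acc x hx
      have hxlt : x < a.length := List.mem_range.mp hx
      simp only [hval]
      rw [if_pos (show a.length ≤ a.length ∧ 1 ≤ a.length by omega),
          if_pos (show x + 1 ≤ a.length ∧ 1 ≤ x + 1 by omega)])
  rw [hcongr]
  rw [PySem.List.foldl_add (g := fun i => pvP a a.length - pvP a (i + 1) - a.getD i 0 * ((a.length : Int) - 1 - (i : Int)))]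
  rw [zero_add]
  rfl

-- ===== VERDICT (by name: the statement is the Claim_ definition above) =====
theorem calc_py_spec : Claim_equal_calc_py := by
  intro a _
  unfold Spec_calc_py
  rw [pv_a_sum, pv_alt_sum, pv_key]
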